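-- pv_equiv track=rewrite | github.com/pypi-data/pypi-mirror-357 | packages/klaude-code/klaude_code-0.1.1-py3-none-any.whl/klaudecode/tools/file_utils.py | get_edit_context_snippet
-- ===== SOURCE A (Python) =====
-- def get_edit_context_snippet(new_content: str, new_string: str, old_content: str, old_string: str, context_lines: int = 5) -> str:
--     """
--     Smart context snippet for edit results with fallback logic:
--     1. Try to find new_string in new_content
--     2. If not found, find where old_string was and show that area in new_content
--     3. If still not found, show first few lines of new_content
--     Returns `line-number→line-content` style output format
--     """
--     # First try: find new_string in new content
--     if new_string in new_content:
--         lines = new_content.splitlines()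
--         for i, line in enumerate(lines):
--             if new_string in line:
--                 start_idx = max(0, i - context_lines)
--                 end_idx = min(len(lines), i + context_lines + 1)
--                 context_lines_slice = lines[start_idx:end_idx]
--                 start_line_num = start_idx + 1
--
--                 snippet_lines = []
--                 for j, line_content in enumerate(context_lines_slice):
--                     line_num = start_line_num + j
--                     snippet_lines.append(f'{line_num}→{line_content}')
--                 return '\n'.join(snippet_lines)
--
--     # Second try: find where old_string was and show that area in new content
--     old_lines = old_content.splitlines()
--     new_lines = new_content.splitlines()
--
--     old_line_idx = -1
--     for i, line in enumerate(old_lines):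
--         if old_string in line:
--             old_line_idx = i
--             break
--
--     if old_line_idx != -1 and old_line_idx < len(new_lines):
--         start_idx = max(0, old_line_idx - context_lines)
--         end_idx = min(len(new_lines), old_line_idx + context_lines + 1)
--         context_lines_slice = new_lines[start_idx:end_idx]
--         start_line_num = start_idx + 1
--
--         snippet_lines = []
--         for j, line_content in enumerate(context_lines_slice):
--             line_num = start_line_num + j
--             snippet_lines.append(f'{line_num}→{line_content}')
--         return '\n'.join(snippet_lines)
--
--     # Last fallback: show first few lines of the file
--     first_lines = new_content.splitlines()[:10]
--     snippet_lines = []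
--     for i, line_content in enumerate(first_lines):
--         snippet_lines.append(f'{i + 1}→{line_content}')
--     return '\n'.join(snippet_lines)
-- ===== SOURCE B (Python) =====
-- def get_edit_context_snippet(new_content: str, new_string: str, old_content: str, old_string: str, context_lines: int = 5) -> str:
--     """Streaming re-implementation: one pass over the numbered lines with a bounded
--     buffer of the preceding context (grep -C style), instead of index arithmetic
--     plus slicing.  Requires context_lines >= 0."""
--     new_lines = new_content.splitlines()
--
--     def stream(pred):
--         # walk the lines once; keep at most context_lines previously-seen numbered
--         # lines; on the first match flush buffer + match + next context_lines lines
--         buf = []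
--         it = enumerate(new_lines, 1)
--         for num, line in it:
--             if pred(num - 1, line):
--                 out = buf + [f'{num}→{line}']
--                 for _ in range(context_lines):
--                     nxt = next(it, None)
--                     if nxt is None:
--                         break
--                     out.append(f'{nxt[0]}→{nxt[1]}')
--                 return '\n'.join(out)
--             buf.append(f'{num}→{line}')
--             if len(buf) > context_lines:
--                 buf.pop(0)
--         return None
--
--     if new_string in new_content:
--         snip = stream(lambda _i, line: new_string in line)
--         if snip is not None:
--             return snip
--
--     hit = next((i for i, line in enumerate(old_content.splitlines()) if old_string in line), None)
--     if hit is not None and hit < len(new_lines):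
--         return stream(lambda i, _line: i == hit)
--
--     return '\n'.join(f'{i}→{line}' for i, line in enumerate(new_lines[:10], 1))
-- ===== Notes on version B (the rewrite author's own statement) =====
-- stated objective: alternative
-- what changed: Replaces A's index arithmetic (max/min window bounds, list slicing, three separate format loops) by a single grep -C style streaming pass that keeps a bounded buffer of the preceding context_lines numbered lines and flushes buffer + match + following lines on the first hit.
-- outside the precondition, e.g. on get_edit_context_snippet('a\nb\nc', 'b', '', '', -1): A returns '', B returns '2→b'
import Mathlib
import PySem

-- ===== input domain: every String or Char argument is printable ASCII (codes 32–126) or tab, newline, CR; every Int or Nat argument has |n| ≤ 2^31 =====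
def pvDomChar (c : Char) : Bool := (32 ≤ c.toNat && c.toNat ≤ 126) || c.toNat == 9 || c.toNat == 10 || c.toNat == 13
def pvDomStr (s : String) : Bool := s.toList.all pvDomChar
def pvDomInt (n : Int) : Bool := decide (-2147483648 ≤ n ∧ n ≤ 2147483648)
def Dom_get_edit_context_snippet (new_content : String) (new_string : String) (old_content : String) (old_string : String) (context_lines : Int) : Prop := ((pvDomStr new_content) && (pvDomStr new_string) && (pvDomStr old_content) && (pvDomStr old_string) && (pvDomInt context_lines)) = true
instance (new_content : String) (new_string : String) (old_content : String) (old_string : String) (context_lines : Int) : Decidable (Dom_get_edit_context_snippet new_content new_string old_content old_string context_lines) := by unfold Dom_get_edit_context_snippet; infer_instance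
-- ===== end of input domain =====

-- B replaces A's index arithmetic (max/min bounds, slicing, three format loops) by a single
-- grep -C style streaming pass with a bounded buffer of preceding numbered lines.

-- ===== PORT A =====
-- A's repeated "for j, line_content in enumerate(slice): append f'{num}→{line}'" + '\n'.join block
def pvFmtLoopA (start_line_num : Int) (sl : List (List Char)) : List Char :=
  PySem.Chars.join ['\n']
    ((PySem.List.enumerate sl).foldl
      (fun acc p => acc ++ [PySem.Int.toChars (start_line_num + p.1) ++ ('→' :: p.2)]) [])

-- A's first loop: 'for i, line in enumerate(lines): if new_string in line: … return …'
def pvScanNewA (ns : List Char) (cl : Int) (lines : List (List Char)) :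
    List (Int × List Char) → Option (List Char)
  | [] => none
  | (i, line) :: rest =>
    if PySem.Chars.isIn ns line then
      let start_idx := max 0 (i - cl)
      let end_idx := min (lines.length : Int) (i + cl + 1)
      some (pvFmtLoopA (start_idx + 1) (PySem.List.slice lines (some start_idx) (some end_idx)))
    else pvScanNewA ns cl lines rest

-- A's second loop: first index of old_lines whose line contains old_string, else -1
def pvOldIdxA (os : List Char) : List (Int × List Char) → Int
  | [] => -1
  | (i, line) :: rest => if PySem.Chars.isIn os line then i else pvOldIdxA os rest

def get_edit_context_snippet (new_content : String) (new_string : String) (old_content : String) (old_string : String) (context_lines : Int) : String :=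
  let firstTry : Option (List Char) :=
    if PySem.Str.isIn new_string new_content then
      pvScanNewA new_string.toList context_lines (PySem.Chars.splitlines new_content.toList)
        (PySem.List.enumerate (PySem.Chars.splitlines new_content.toList))
    else none
  match firstTry with
  | some r => String.ofList r
  | none =>
    let old_lines := PySem.Chars.splitlines old_content.toList
    let new_lines := PySem.Chars.splitlines new_content.toList
    let old_line_idx := pvOldIdxA old_string.toList (PySem.List.enumerate old_lines)
    if old_line_idx ≠ -1 ∧ old_line_idx < (new_lines.length : Int) then
      let start_idx := max 0 (old_line_idx - context_lines)
      let end_idx := min (new_lines.length : Int) (old_line_idx + context_lines + 1)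
      String.ofList (pvFmtLoopA (start_idx + 1)
        (PySem.List.slice new_lines (some start_idx) (some end_idx)))
    else
      let first_lines := PySem.List.slice (PySem.Chars.splitlines new_content.toList) none (some 10)
      String.ofList (PySem.Chars.join ['\n']
        ((PySem.List.enumerate first_lines).foldl
          (fun acc p => acc ++ [PySem.Int.toChars (p.1 + 1) ++ ('→' :: p.2)]) []))

-- ===== PORT B =====
-- B's f'{num}→{line}'
def pvFmtB (num : Int) (line : List Char) : List Char := PySem.Int.toChars num ++ ('→' :: line)

-- B's "for _ in range(context_lines): nxt = next(it, None); if nxt is None: break; append"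
def pvTakeB : Nat → Int → List (List Char) → List (List Char)
  | 0, _, _ => []
  | _ + 1, _, [] => []
  | n + 1, num, l :: r => pvFmtB num l :: pvTakeB n (num + 1) r

-- B's stream(pred): walk the numbered lines once with a bounded buffer of preceding lines
def pvStreamB (pred : Int → List Char → Bool) (cl : Int) :
    Int → List (List Char) → List (List Char) → Option (List Char)
  | _, _, [] => none
  | num, buf, line :: rest =>
    if pred (num - 1) line then
      some (PySem.Chars.join ['\n'] (buf ++ [pvFmtB num line] ++ pvTakeB cl.toNat (num + 1) rest))
    else
      let buf' := buf ++ [pvFmtB num line]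
      pvStreamB pred cl (num + 1) (if ((buf'.length : Int) > cl) then buf'.drop 1 else buf') rest

-- B's 'next((i for i, line in enumerate(…) if old_string in line), None)'
def pvFindIdxB (ns : List Char) : List (Int × List Char) → Option Int
  | [] => none
  | (i, line) :: rest => if PySem.Chars.isIn ns line then some i else pvFindIdxB ns rest

def get_edit_context_snippet_alt (new_content : String) (new_string : String) (old_content : String) (old_string : String) (context_lines : Int) : String :=
  let new_lines := PySem.Chars.splitlines new_content.toList
  let step1 : Option (List Char) :=
    if PySem.Str.isIn new_string new_content then
      pvStreamB (fun _ line => PySem.Chars.isIn new_string.toList line) context_lines 1 [] new_lines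
    else none
  match step1 with
  | some r => String.ofList r
  | none =>
    match pvFindIdxB old_string.toList (PySem.List.enumerate (PySem.Chars.splitlines old_content.toList)) with
    | some j =>
      if j < (new_lines.length : Int) then
        -- Python B returns stream(...) directly; the pred 'i == hit' always fires here,
        -- so the 'none' default is unreachable (totality only)
        String.ofList ((pvStreamB (fun i _ => i == j) context_lines 1 [] new_lines).getD [])
      else
        String.ofList (PySem.Chars.join ['\n']
          ((PySem.List.enumerate (PySem.List.slice new_lines none (some 10)) 1).map
            (fun p => pvFmtB p.1 p.2)))
    | none =>
      String.ofList (PySem.Chars.join ['\n']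
        ((PySem.List.enumerate (PySem.List.slice new_lines none (some 10)) 1).map
          (fun p => pvFmtB p.1 p.2)))

-- ===== PRECONDITION & SPEC =====
-- Pre_ excludes negative context_lines (outside the natural domain of a context-line count):
-- B's streaming buffer has no meaning for a negative count, while A there produces windows via
-- Python's negative-slice arithmetic.
def Pre_get_edit_context_snippet (new_content : String) (new_string : String) (old_content : String) (old_string : String) (context_lines : Int) : Prop := 0 ≤ context_lines
instance (new_content : String) (new_string : String) (old_content : String) (old_string : String) (context_lines : Int) : Decidable (Pre_get_edit_context_snippet new_content new_string old_content old_string context_lines) := by unfold Pre_get_edit_context_snippet; infer_instance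
def pvWitness_get_edit_context_snippet : String × String × String × String × Int := ("a\nb\nc", "b", "", "", 1)

def Spec_get_edit_context_snippet (new_content : String) (new_string : String) (old_content : String) (old_string : String) (context_lines : Int) (out : String) : Prop := out = get_edit_context_snippet_alt new_content new_string old_content old_string context_lines
instance (new_content : String) (new_string : String) (old_content : String) (old_string : String) (context_lines : Int) (out : String) : Decidable (Spec_get_edit_context_snippet new_content new_string old_content old_string context_lines out) := by unfold Spec_get_edit_context_snippet; infer_instance

-- ===== CLAIM (what is proved, stated in full; the proofs are below) =====
def Claim_equal_get_edit_context_snippet : Prop := ∀ (new_content : String) (new_string : String) (old_content : String) (old_string : String) (context_lines : Int), Dom_get_edit_context_snippet new_content new_string old_content old_string context_lines → Pre_get_edit_context_snippet new_content new_string old_content old_string context_lines → Spec_get_edit_context_snippet new_content new_string old_content old_string context_lines (get_edit_context_snippet new_content new_string old_content old_string context_lines)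

-- ===== LEMMAS AND PROOFS =====

-- the numbered lines, starting at line number s
def pvNumFrom (s : Int) (ls : List (List Char)) : List (List Char) :=
  (PySem.List.enumerate ls s).map (fun p => pvFmtB p.1 p.2)

-- first index i (counting from s) whose line satisfies pred
def pvFirstIdx (pred : Int → List Char → Bool) (s : Int) : List (List Char) → Option Int
  | [] => none
  | l :: r => if pred s l then some s else pvFirstIdx pred (s + 1) r

-- the common window normal form: numbered lines k∸n … min (len-1) (k+n)
def pvWindow (ls : List (List Char)) (k n : Nat) : List Char :=
  PySem.Chars.join ['\n'] (((pvNumFrom 1 ls).drop (k - n)).take (min k n + n + 1))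

theorem pvNumFrom_nil (s : Int) : pvNumFrom s [] = [] := by
  simp [pvNumFrom, PySem.List.enumerate_nil]

theorem pvNumFrom_cons (s : Int) (l : List Char) (r : List (List Char)) :
    pvNumFrom s (l :: r) = pvFmtB s l :: pvNumFrom (s + 1) r := by
  simp [pvNumFrom, PySem.List.enumerate_cons]

theorem pvNumFrom_append (s : Int) (xs ys : List (List Char)) :
    pvNumFrom s (xs ++ ys) = pvNumFrom s xs ++ pvNumFrom (s + xs.length) ys := by
  simp [pvNumFrom, PySem.List.enumerate_append]

theorem length_pvNumFrom (s : Int) (ls : List (List Char)) :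
    (pvNumFrom s ls).length = ls.length := by
  simp [pvNumFrom, PySem.List.length_enumerate]

theorem pvTakeB_eq_take (n : Nat) (s : Int) (r : List (List Char)) :
    pvTakeB n s r = (pvNumFrom s r).take n := by
  induction n generalizing s r with
  | zero => simp [pvTakeB]
  | succ m ih =>
    cases r with
    | nil => simp [pvTakeB, pvNumFrom_nil]
    | cons l rest => simp [pvTakeB, pvNumFrom_cons, ih]

theorem pvFindIdxB_eq_firstIdx (ns : List Char) (s : Int) (ls : List (List Char)) :
    pvFindIdxB ns (PySem.List.enumerate ls s) = pvFirstIdx (fun _ l => PySem.Chars.isIn ns l) s ls := by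
  induction ls generalizing s with
  | nil => simp [PySem.List.enumerate_nil, pvFindIdxB, pvFirstIdx]
  | cons l rest ih =>
    rw [PySem.List.enumerate_cons]
    simp only [pvFindIdxB, pvFirstIdx]
    split <;> simp [ih]

theorem pvFirstIdx_ge (pred : Int → List Char → Bool) (ls : List (List Char)) (s i : Int)
    (h : pvFirstIdx pred s ls = some i) : s ≤ i ∧ i < s + ls.length := by
  induction ls generalizing s with
  | nil => simp [pvFirstIdx] at h
  | cons l rest ih =>
    simp only [pvFirstIdx] at h
    split at h
    · injection h with h; subst h
      refine ⟨le_refl _, ?_⟩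
      simp only [List.length_cons]; push_cast; omega
    · obtain ⟨h1, h2⟩ := ih (s + 1) h
      constructor
      · omega
      · simp only [List.length_cons]; push_cast; omega

theorem pvFirstIdx_eqPred (j : Int) (ls : List (List Char)) (s : Int)
    (h1 : s ≤ j) (h2 : j < s + ls.length) :
    pvFirstIdx (fun i _ => i == j) s ls = some j := by
  induction ls generalizing s with
  | nil => simp at h2; omega
  | cons l rest ih =>
    simp only [pvFirstIdx]
    by_cases hs : s = j
    · simp [hs]
    · rw [if_neg (by simp [hs])]
      apply ih
      · omega
      · simp only [List.length_cons] at h2; push_cast at h2 ⊢; omega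

-- A's foldl-append formatter as a map
theorem pvFmtLoopA_eq_map (n : Int) (sl : List (List Char)) :
    pvFmtLoopA n sl = PySem.Chars.join ['\n']
      ((PySem.List.enumerate sl).map (fun p => PySem.Int.toChars (n + p.1) ++ ('→' :: p.2))) := by
  unfold pvFmtLoopA
  rw [PySem.List.foldl_append_singleton_eq_map
    (fun p : Int × List Char => PySem.Int.toChars (n + p.1) ++ ('→' :: p.2))]
  rw [List.nil_append]

-- shifting the enumeration start into the formatted line number
theorem pvEnumShift (c : Int) (ls : List (List Char)) (a : Int) :
    (PySem.List.enumerate ls a).map (fun p => pvFmtB (c + p.1) p.2)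
      = (PySem.List.enumerate ls (a + c)).map (fun p => pvFmtB p.1 p.2) := by
  induction ls generalizing a with
  | nil => simp [PySem.List.enumerate_nil]
  | cons l r ih =>
    rw [PySem.List.enumerate_cons, PySem.List.enumerate_cons]
    simp only [List.map_cons, ih (a + 1)]
    rw [Int.add_comm c a, Int.add_right_comm a 1 c]

theorem pvEnumTake (ls : List (List Char)) (a : Int) (m : Nat) :
    PySem.List.enumerate (ls.take m) a = (PySem.List.enumerate ls a).take m := by
  induction ls generalizing a m with
  | nil => simp [PySem.List.enumerate_nil]
  | cons l r ih =>
    cases m with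
    | zero => simp [PySem.List.enumerate_nil]
    | succ k =>
      rw [List.take_succ_cons, PySem.List.enumerate_cons, PySem.List.enumerate_cons, ih]
      simp

theorem pvEnumDrop (ls : List (List Char)) (a : Int) (s : Nat) :
    PySem.List.enumerate (ls.drop s) (a + s) = (PySem.List.enumerate ls a).drop s := by
  induction ls generalizing a s with
  | nil => simp [PySem.List.enumerate_nil]
  | cons l r ih =>
    cases s with
    | zero => simp
    | succ k =>
      rw [List.drop_succ_cons, PySem.List.enumerate_cons, List.drop_succ_cons, ← ih (a + 1) k]
      congr 1
      push_cast; ring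

-- B's streaming loop, characterised: with the invariant buffer it returns the window at the
-- first matching index (or none)
theorem pvStreamB_spec (pred : Int → List Char → Bool) (n : Nat) :
    ∀ (todo done : List (List Char)),
      pvStreamB pred (n : Int) ((done.length : Int) + 1)
          ((pvNumFrom 1 done).drop (done.length - n)) todo =
        (pvFirstIdx pred (done.length : Int) todo).map
          (fun i => pvWindow (done ++ todo) i.toNat n) := by
  intro todo
  induction todo with
  | nil => intro done; simp [pvStreamB, pvFirstIdx]
  | cons line rest ih =>
    intro done
    have hND : (pvNumFrom 1 done).length = done.length := length_pvNumFrom 1 done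
    simp only [pvStreamB, pvFirstIdx]
    have hidx : (done.length : Int) + 1 - 1 = (done.length : Int) := by ring
    rw [hidx]
    have h1l : (1 : Int) + (done.length : Int) = (done.length : Int) + 1 := by ring
    by_cases hp : pred (done.length : Int) line = true
    · rw [if_pos hp, if_pos hp]
      simp only [Option.map_some]
      congr 1
      rw [Int.toNat_natCast, pvTakeB_eq_take, Int.toNat_natCast]
      unfold pvWindow
      congr 1
      rw [pvNumFrom_append, pvNumFrom_cons, List.drop_append]
      have h0 : (done.length - n) - (pvNumFrom 1 done).length = 0 := by rw [hND]; omega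
      rw [h0, List.drop_zero, List.take_append]
      have hblen : ((pvNumFrom 1 done).drop (done.length - n)).length
          = done.length - (done.length - n) := by simp [hND]
      have harg : min done.length n + n + 1 - ((pvNumFrom 1 done).drop (done.length - n)).length
          = n + 1 := by rw [hblen]; omega
      rw [List.append_assoc, List.singleton_append]
      rw [harg, List.take_succ_cons, (List.take_of_length_le (by rw [hblen]; omega) :
        ((pvNumFrom 1 done).drop (done.length - n)).take (min done.length n + n + 1)
          = (pvNumFrom 1 done).drop (done.length - n))]
      rw [h1l]
    · rw [if_neg hp, if_neg hp]
      have happ : pvNumFrom 1 (done ++ [line])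
          = pvNumFrom 1 done ++ [pvFmtB ((done.length : Int) + 1) line] := by
        rw [pvNumFrom_append, pvNumFrom_cons, pvNumFrom_nil, h1l]
      have hbuf :
          (if ((((pvNumFrom 1 done).drop (done.length - n)
                ++ [pvFmtB ((done.length : Int) + 1) line]).length : Int) > (n : Int))
            then ((pvNumFrom 1 done).drop (done.length - n)
                ++ [pvFmtB ((done.length : Int) + 1) line]).drop 1
            else (pvNumFrom 1 done).drop (done.length - n)
                ++ [pvFmtB ((done.length : Int) + 1) line])
          = (pvNumFrom 1 (done ++ [line])).drop ((done ++ [line]).length - n) := by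
        rw [happ]
        simp only [List.length_append, List.length_singleton]
        by_cases hn : n ≤ done.length
        · rw [if_pos (by simp [hND]; omega)]
          rw [List.drop_append, List.drop_append, List.drop_drop]
          have e1 : done.length - n + 1 = done.length + 1 - n := by omega
          have e2 : 1 - ((pvNumFrom 1 done).drop (done.length - n)).length
              = done.length + 1 - n - (pvNumFrom 1 done).length := by
            simp only [List.length_drop, hND]; omega
          rw [e1, e2]
        · rw [if_neg (by simp [hND]; omega)]
          have e1 : done.length - n = 0 := by omega
          have e2 : done.length + 1 - n = 0 := by omega
          rw [e1, e2, List.drop_zero, List.drop_zero]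
      rw [hbuf]
      have hcast : ((done.length : Int) + 1 + 1) = (((done ++ [line]).length : Int) + 1) := by
        simp
      rw [hcast, ih (done ++ [line])]
      have hfi : ((done ++ [line]).length : Int) = (done.length : Int) + 1 := by simp
      rw [hfi, ← List.append_cons]

-- A's window (slice + offset formatting) is the window normal form
theorem pvFmtLoopA_window (ls : List (List Char)) (k n : Nat) :
    pvFmtLoopA (max 0 ((k : Int) - n) + 1)
        (PySem.List.slice ls (some (max 0 ((k : Int) - n)))
          (some (min (ls.length : Int) ((k : Int) + n + 1)))) = pvWindow ls k n := by
  have hs : max (0 : Int) ((k : Int) - n) = ((k - n : Nat) : Int) := by omega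
  have he : min (ls.length : Int) ((k : Int) + n + 1)
      = ((min ls.length (k + n + 1) : Nat) : Int) := by omega
  rw [hs, he, PySem.List.slice_natCast, pvFmtLoopA_eq_map]
  unfold pvWindow
  congr 1
  have hfn : (PySem.List.enumerate ((ls.drop (k - n)).take (min ls.length (k + n + 1) - (k - n)))).map
      (fun p => PySem.Int.toChars (((k - n : Nat) : Int) + 1 + p.1) ++ ('→' :: p.2))
    = (PySem.List.enumerate ((ls.drop (k - n)).take (min ls.length (k + n + 1) - (k - n)))).map
      (fun p => pvFmtB ((((k - n : Nat) : Int) + 1) + p.1) p.2) := by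
    apply List.map_congr_left; intro p _; simp [pvFmtB]
  rw [hfn, pvEnumShift]
  unfold pvNumFrom
  rw [← List.map_drop, ← List.map_take, ← pvEnumDrop, pvEnumTake]
  have hst : (0 : Int) + (((k - n : Nat) : Int) + 1) = 1 + ((k - n : Nat) : Int) := by ring
  rw [hst]
  apply congrArg
  apply List.take_eq_take_iff.mpr
  simp only [PySem.List.length_enumerate, List.length_drop]
  omega

-- the 10-line fallbacks agree
theorem pvFallback_eq (NL : List (List Char)) :
    PySem.Chars.join ['\n'] ((PySem.List.enumerate (PySem.List.slice NL none (some 10))).foldl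
      (fun acc p => acc ++ [PySem.Int.toChars (p.1 + 1) ++ ('→' :: p.2)]) [])
  = PySem.Chars.join ['\n'] ((PySem.List.enumerate (PySem.List.slice NL none (some 10)) 1).map
      (fun p => pvFmtB p.1 p.2)) := by
  rw [PySem.List.foldl_append_singleton_eq_map
    (fun p : Int × List Char => PySem.Int.toChars (p.1 + 1) ++ ('→' :: p.2)), List.nil_append]
  congr 1
  have h : (PySem.List.enumerate (PySem.List.slice NL none (some 10))).map
      (fun p => PySem.Int.toChars (p.1 + 1) ++ ('→' :: p.2))
    = (PySem.List.enumerate (PySem.List.slice NL none (some 10))).map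
      (fun p => pvFmtB (1 + p.1) p.2) := by
    apply List.map_congr_left; intro p _; simp [pvFmtB, Int.add_comm]
  rw [h, pvEnumShift]
  norm_num

-- A's first loop is: find the first matching index, then format that window
theorem pvScanNewA_eq_find (ns : List Char) (cl : Int) (lines : List (List Char))
    (es : List (Int × List Char)) :
    pvScanNewA ns cl lines es = (pvFindIdxB ns es).map (fun i =>
      pvFmtLoopA (max 0 (i - cl) + 1)
        (PySem.List.slice lines (some (max 0 (i - cl)))
          (some (min (lines.length : Int) (i + cl + 1))))) := by
  induction es with
  | nil => rfl
  | cons p rest ih =>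
    obtain ⟨i, line⟩ := p
    simp only [pvScanNewA, pvFindIdxB]
    split <;> simp [ih]

-- A's -1-sentinel index loop versus B's Option-valued one
theorem pvOldIdxA_eq_find (os : List Char) (es : List (Int × List Char)) :
    pvOldIdxA os es = (pvFindIdxB os es).getD (-1) := by
  induction es with
  | nil => rfl
  | cons p rest ih =>
    obtain ⟨i, line⟩ := p
    simp only [pvOldIdxA, pvFindIdxB]
    split <;> simp [ih]

-- ===== VERDICT (by name: the statement is the Claim_ definition above) =====
theorem get_edit_context_snippet_spec : Claim_equal_get_edit_context_snippet := by
  intro nc ns oc os cl _ hpre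
  unfold Pre_get_edit_context_snippet at hpre
  obtain ⟨n, rfl⟩ : ∃ m : Nat, cl = (m : Int) := ⟨cl.toNat, (Int.toNat_of_nonneg hpre).symm⟩
  unfold Spec_get_edit_context_snippet get_edit_context_snippet get_edit_context_snippet_alt
  have hstream : ∀ (pred : Int → List Char → Bool),
      pvStreamB pred (n : Int) 1 [] (PySem.Chars.splitlines nc.toList)
        = (pvFirstIdx pred 0 (PySem.Chars.splitlines nc.toList)).map
            (fun i => pvWindow (PySem.Chars.splitlines nc.toList) i.toNat n) := by
    intro pred
    have h := pvStreamB_spec pred n (PySem.Chars.splitlines nc.toList) []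
    simpa [pvNumFrom_nil] using h
  simp only [pvScanNewA_eq_find, pvOldIdxA_eq_find, pvFindIdxB_eq_firstIdx, hstream]
  cases hin : PySem.Str.isIn ns nc with
  | true =>
    simp only [ite_true]
    cases hfi : pvFirstIdx (fun _ l => PySem.Chars.isIn ns.toList l) 0
        (PySem.Chars.splitlines nc.toList) with
    | some i =>
      simp only [Option.map_some]
      obtain ⟨h0i, hilen⟩ := pvFirstIdx_ge _ _ _ _ hfi
      have hik : i = (i.toNat : Int) := by omega
      rw [hik]
      rw [pvFmtLoopA_window (PySem.Chars.splitlines nc.toList) i.toNat n]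
      rw [Int.toNat_natCast]
    | none =>
      simp only [Option.map_none]
      cases hold : pvFirstIdx (fun _ l => PySem.Chars.isIn os.toList l) 0
          (PySem.Chars.splitlines oc.toList) with
      | some j =>
        obtain ⟨h0j, hjlen⟩ := pvFirstIdx_ge _ _ _ _ hold
        simp only [Option.getD_some]
        by_cases hlt : j < ((PySem.Chars.splitlines nc.toList).length : Int)
        · rw [if_pos ⟨by omega, hlt⟩, if_pos hlt]
          rw [pvFirstIdx_eqPred j _ 0 (by omega) (by omega)]
          simp only [Option.map_some, Option.getD_some]
          have hjk : j = (j.toNat : Int) := by omega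
          rw [hjk]
          rw [pvFmtLoopA_window (PySem.Chars.splitlines nc.toList) j.toNat n]
          rw [Int.toNat_natCast]
        · rw [if_neg (by intro h; exact hlt h.2), if_neg hlt]
          exact congrArg String.ofList (pvFallback_eq _)
      | none =>
        simp only [Option.getD_none]
        rw [if_neg (by intro h; exact h.1 rfl)]
        exact congrArg String.ofList (pvFallback_eq _)
  | false =>
    simp only [Bool.false_eq_true, ite_false]
    cases hold : pvFirstIdx (fun _ l => PySem.Chars.isIn os.toList l) 0
        (PySem.Chars.splitlines oc.toList) with
    | some j =>
      obtain ⟨h0j, hjlen⟩ := pvFirstIdx_ge _ _ _ _ hold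
      simp only [Option.getD_some]
      by_cases hlt : j < ((PySem.Chars.splitlines nc.toList).length : Int)
      · rw [if_pos ⟨by omega, hlt⟩, if_pos hlt]
        rw [pvFirstIdx_eqPred j _ 0 (by omega) (by omega)]
        simp only [Option.map_some, Option.getD_some]
        have hjk : j = (j.toNat : Int) := by omega
        rw [hjk]
        rw [pvFmtLoopA_window (PySem.Chars.splitlines nc.toList) j.toNat n]
        rw [Int.toNat_natCast]
      · rw [if_neg (by intro h; exact hlt h.2), if_neg hlt]
        exact congrArg String.ofList (pvFallback_eq _)
    | none =>
      simp only [Option.getD_none]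
      rw [if_neg (by intro h; exact h.1 rfl)]
      exact congrArg String.ofList (pvFallback_eq _)
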